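-- pv_equiv track=rewrite | github.com/Do-code-ing/Python_Programmers | Coding_Test_Lv4/19_sw2018_지형편집.py | solution
-- ===== SOURCE A (Python) =====
-- def solution(land, P, Q):
--     # land를 1차원 배열로 만들고 오름차순으로 정렬
--     dp = []
--     for la in land:
--         dp += la
--
--     dp.sort()
--     n = len(dp)
--     total = sum(dp)     # 모든 블록의 개수
--     answer = total * Q  # 모든 블록을 제거한 것을 기준으로 정답을 초기화
--     cost = (total - (dp[0] * n)) * Q    # 제일 낮은 층으로 만들 때의 비용
--     if answer > cost:
--         answer = cost
--
--     for i in range(1, n):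
--         if dp[i] != dp[i-1]:    # 블록 층 수의 변동이 생기면(예를 들어, 한 층 더 높이에서의 변동 값을 계산)
--             # 이전 낮은 층으로 만들 때의 비용에서 다음 높이의 층을 계산하려면,
--             # 층수가 올라간 만큼,
--             # i개의 빈 칸이 생기고, n-i개의 블록을 안 지워도 되므로 각각 계산
--             cost += (P * i * (dp[i] - dp[i-1])) - (Q * (n-i) * (dp[i] - dp[i-1]))
--             if answer > cost:
--                 answer = cost
--
--     return answer
-- ===== SOURCE B (Python) =====
-- def solution(land, P, Q):
--     # Flatten; evaluate the levelling cost directly at every distinct height,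
--     # against the "remove every block" baseline total*Q that A also uses.
--     cells = [x for row in land for x in row]
--     total = sum(cells)
--     best = total * Q
--     for h in set(cells):
--         c = 0
--         for x in cells:
--             if x < h:
--                 c += P * (h - x)
--             elif x > h:
--                 c += Q * (x - h)
--         if c < best:
--             best = c
--     return best
-- ===== Notes on version B (the rewrite author's own statement) =====
-- stated objective: alternative
-- what changed: Instead of sorting the flattened heights and sweeping with an incrementally updated cost, B evaluates the levelling cost at each distinct height by a direct scan of all cells and takes the minimum against the remove-everything baseline total*Q.
import Mathlib
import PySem

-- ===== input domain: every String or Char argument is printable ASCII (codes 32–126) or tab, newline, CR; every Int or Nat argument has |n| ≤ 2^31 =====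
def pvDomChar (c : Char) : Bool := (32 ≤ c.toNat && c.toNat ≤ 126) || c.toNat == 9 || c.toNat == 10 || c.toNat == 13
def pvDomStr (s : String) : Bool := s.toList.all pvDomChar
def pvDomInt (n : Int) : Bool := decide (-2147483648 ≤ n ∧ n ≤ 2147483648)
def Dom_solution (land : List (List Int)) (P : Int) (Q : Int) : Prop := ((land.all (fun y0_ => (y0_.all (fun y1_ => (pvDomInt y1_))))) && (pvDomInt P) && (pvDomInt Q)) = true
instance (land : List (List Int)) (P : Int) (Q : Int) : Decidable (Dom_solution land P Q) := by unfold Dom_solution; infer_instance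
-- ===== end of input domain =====

-- B replaces A's sort-and-sweep by a direct cost evaluation at every distinct height
-- (alternative decomposition, not claimed faster); equivalence on nonempty flattened land.

-- ===== PORT A =====
-- body of A's 'for i in range(1, n)' loop, as a named helper
def stepA (dp : List Int) (P Q n : Int) (st : Int × Int) (i : Int) : Int × Int :=
  if PySem.List.pyGetD dp i 0 ≠ PySem.List.pyGetD dp (i-1) 0 then
    let cost := st.2 + (P * i * (PySem.List.pyGetD dp i 0 - PySem.List.pyGetD dp (i-1) 0)
                        - Q * (n - i) * (PySem.List.pyGetD dp i 0 - PySem.List.pyGetD dp (i-1) 0))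
    (if st.1 > cost then cost else st.1, cost)
  else st

def solution (land : List (List Int)) (P : Int) (Q : Int) : Int :=
  let dp0 := land.foldl (fun acc la => acc ++ la) ([] : List Int)
  let dp := PySem.List.sorted dp0 (fun x => x) false
  let n : Int := dp.length
  let total := dp.sum
  let answer := total * Q
  let cost := (total - (PySem.List.pyGetD dp 0 0) * n) * Q
  let answer := if answer > cost then cost else answer
  let r := (PySem.List.pyRange 1 n 1).foldl (stepA dp P Q n) (answer, cost)
  r.1

-- ===== PORT B =====
-- B's inner scan: cost of levelling every cell to height h
def cellCost (cells : List Int) (P Q h : Int) : Int :=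
  cells.foldl (fun c x => if x < h then c + P * (h - x) else if h < x then c + Q * (x - h) else c) 0

def solution_alt (land : List (List Int)) (P : Int) (Q : Int) : Int :=
  let cells := land.flatMap id
  let total := cells.sum
  (PySem.Set.ofList cells).foldl
    (fun best h => let c := cellCost cells P Q h; if c < best then c else best)
    (total * Q)

-- ===== PRECONDITION & SPEC =====
-- Pre_ excludes land whose rows are all empty: there A raises IndexError at dp[0].
def Pre_solution (land : List (List Int)) (P : Int) (Q : Int) : Prop := land.flatMap id ≠ []
instance (land : List (List Int)) (P : Int) (Q : Int) : Decidable (Pre_solution land P Q) := by unfold Pre_solution; infer_instance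
def pvWitness_solution : List (List Int) × Int × Int := ([[1, 2], [3]], 2, 3)

def Spec_solution (land : List (List Int)) (P : Int) (Q : Int) (out : Int) : Prop := out = solution_alt land P Q
instance (land : List (List Int)) (P : Int) (Q : Int) (out : Int) : Decidable (Spec_solution land P Q out) := by unfold Spec_solution; infer_instance

-- ===== CLAIM (what is proved, stated in full; the proofs are below) =====
def Claim_equal_solution : Prop := ∀ (land : List (List Int)) (P : Int) (Q : Int), Dom_solution land P Q → Pre_solution land P Q → Spec_solution land P Q (solution land P Q)

-- ===== LEMMAS AND PROOFS =====

-- per-cell contribution to the cost of levelling to height h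
def gcost (P Q h x : Int) : Int := if x < h then P * (h - x) else if h < x then Q * (x - h) else 0

-- total cost of levelling the cells to height h, as a sum
def F (dp : List Int) (P Q h : Int) : Int := (dp.map (gcost P Q h)).sum

lemma cellCost_eq_F (cells : List Int) (P Q h : Int) : cellCost cells P Q h = F cells P Q h := by
  have key : ∀ (l : List Int) (c : Int),
      l.foldl (fun c x => if x < h then c + P * (h - x) else if h < x then c + Q * (x - h) else c) c
        = c + (l.map (gcost P Q h)).sum := by
    intro l
    induction l with
    | nil => intro c; simp
    | cons a t ih =>
      intro c
      simp only [List.foldl_cons, List.map_cons, List.sum_cons, gcost]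
      split_ifs <;> rw [ih] <;> ring
  simpa [cellCost, F] using key cells 0

lemma F_perm {l₁ l₂ : List Int} (hp : l₁.Perm l₂) (P Q h : Int) : F l₁ P Q h = F l₂ P Q h :=
  List.Perm.sum_eq (hp.map _)

lemma sum_map_shift (l : List Int) (f₁ f₂ : Int → Int) (c : Int)
    (hc : ∀ x ∈ l, f₁ x = f₂ x + c) :
    (l.map f₁).sum = (l.map f₂).sum + l.length * c := by
  induction l with
  | nil => simp
  | cons a t ih =>
    simp only [List.map_cons, List.sum_cons, List.length_cons]
    rw [hc a List.mem_cons_self, ih (fun x hx => hc x (List.mem_cons_of_mem _ hx))]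
    push_cast; ring

lemma sum_map_q (l : List Int) (Q m : Int) :
    (l.map (fun x => Q * (x - m))).sum = (l.sum - m * l.length) * Q := by
  induction l with
  | nil => simp
  | cons a t ih =>
    simp only [List.map_cons, List.sum_cons, List.length_cons]
    rw [ih]; push_cast; ring

-- base: cost of levelling to the minimum element
lemma F_min (dp : List Int) (P Q m : Int) (hm : ∀ x ∈ dp, m ≤ x) :
    F dp P Q m = (dp.sum - m * dp.length) * Q := by
  have hg : ∀ x ∈ dp, gcost P Q m x = Q * (x - m) := by
    intro x hx
    have hx' := hm x hx
    unfold gcost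
    rcases lt_or_eq_of_le hx' with h | h
    · rw [if_neg (by omega), if_pos h]
    · rw [if_neg (by omega), if_neg (by omega), ← h]; ring
  rw [F, List.map_congr_left hg, sum_map_q]

-- step: cost difference between two heights with no cell strictly between them
lemma F_step (u v : List Int) (P Q a b : Int) (hab : a < b)
    (hu : ∀ x ∈ u, x ≤ a) (hv : ∀ x ∈ v, b ≤ x) :
    F (u ++ v) P Q b = F (u ++ v) P Q a + (P * u.length * (b - a) - Q * v.length * (b - a)) := by
  have hU : (u.map (gcost P Q b)).sum = (u.map (gcost P Q a)).sum + u.length * (P * (b - a)) := by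
    apply sum_map_shift
    intro x hx
    have hx' := hu x hx
    unfold gcost
    rcases lt_or_eq_of_le hx' with h | h
    · rw [if_pos (by omega), if_pos h]; ring
    · rw [if_pos (by omega), if_neg (by omega), if_neg (by omega), h]; ring
  have hV : (v.map (gcost P Q b)).sum = (v.map (gcost P Q a)).sum + v.length * (-(Q * (b - a))) := by
    apply sum_map_shift
    intro x hx
    have hx' := hv x hx
    unfold gcost
    rcases lt_or_eq_of_le hx' with h | h
    · rw [if_neg (by omega), if_pos h, if_neg (by omega), if_pos (by omega)]; ring
    · rw [if_neg (by omega), if_neg (by omega), if_neg (by omega), if_pos (by omega), ← h]; ring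
  simp only [F, List.map_append, List.sum_append]
  rw [hU, hV]; ring

lemma ite_gt_eq_min (a c : Int) : (if a > c then c else a) = min a c := by
  rw [min_def]; split_ifs <;> omega

lemma ite_lt_eq_min (c a : Int) : (if c < a then c else a) = min a c := by
  rw [min_def]; split_ifs <;> omega

lemma foldl_min_eq_of_mem_iff (a : Int) (l₁ l₂ : List Int) (h : ∀ x, x ∈ l₁ ↔ x ∈ l₂) :
    l₁.foldl min a = l₂.foldl min a := by
  apply le_antisymm
  · rcases PySem.List.foldl_min_mem l₂ a with h2 | h2
    · rw [h2]; exact (PySem.List.foldl_min_le l₁ a).1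
    · exact (PySem.List.foldl_min_le l₁ a).2 _ ((h _).mpr h2)
  · rcases PySem.List.foldl_min_mem l₁ a with h1 | h1
    · rw [h1]; exact (PySem.List.foldl_min_le l₂ a).1
    · exact (PySem.List.foldl_min_le l₂ a).2 _ ((h _).mp h1)

-- the invariant of A's sweep over range(1, n)
lemma sweep (dp : List Int) (P Q : Int) (hs : dp.Pairwise (· ≤ ·)) :
    ∀ (m k : Nat), 1 ≤ k → k + m = dp.length →
      (PySem.List.pyRange (k : Int) (dp.length : Int) 1).foldl
          (stepA dp P Q (dp.length : Int))
          (((dp.take k).map (F dp P Q)).foldl min (dp.sum * Q), F dp P Q (dp.getD (k-1) 0))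
        = ((dp.map (F dp P Q)).foldl min (dp.sum * Q), F dp P Q (dp.getD (dp.length - 1) 0)) := by
  have mono : ∀ (i j : Nat) (hi : i < dp.length) (hj : j < dp.length), i ≤ j → dp[i] ≤ dp[j] := by
    intro i j hi hj hij
    rcases eq_or_lt_of_le hij with rfl | h
    · exact le_refl _
    · exact List.pairwise_iff_getElem.mp hs i j hi hj h
  intro m
  induction m with
  | zero =>
    intro k hk1 hkn
    rw [PySem.List.pyRange_one_eq_nil (by omega)]
    simp only [List.foldl_nil]
    rw [Nat.add_zero] at hkn
    subst hkn
    rw [List.take_length]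
  | succ m ih =>
    intro k hk1 hkn
    have hklt : k < dp.length := by omega
    have hk1lt : k - 1 < dp.length := by omega
    -- evaluate the step function at i = k
    have hget : PySem.List.pyGetD dp (k : Int) 0 = dp[k] := by
      rw [PySem.List.pyGetD_natCast, List.getD_eq_getElem dp 0 hklt]
    have hcast : (k : Int) - 1 = ((k - 1 : Nat) : Int) := by
      push_cast [Nat.cast_sub hk1]; ring
    have hget' : PySem.List.pyGetD dp ((k : Int) - 1) 0 = dp[k-1] := by
      rw [hcast, PySem.List.pyGetD_natCast, List.getD_eq_getElem dp 0 hk1lt]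
    have htake : dp.take (k+1) = dp.take k ++ [dp[k]] := by
      rw [List.take_succ, List.getElem?_eq_getElem hklt]; rfl
    have hmemk : F dp P Q dp[k-1] ∈ (dp.take k).map (F dp P Q) := by
      apply List.mem_map_of_mem
      have : (dp.take k)[k-1]'(by simp [List.length_take]; omega) = dp[k-1] := List.getElem_take
      exact this ▸ List.getElem_mem _
    have hrange : PySem.List.pyRange (k : Int) (dp.length : Int) 1
        = (k : Int) :: PySem.List.pyRange ((k : Int) + 1) (dp.length : Int) 1 :=
      PySem.List.pyRange_one_cons (by exact_mod_cast hklt)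
    have hgetD : dp.getD (k-1) 0 = dp[k-1] := List.getD_eq_getElem dp 0 hk1lt
    have hgetDk : dp.getD k 0 = dp[k] := List.getD_eq_getElem dp 0 hklt
    rw [hrange, List.foldl_cons]
    have hnext : stepA dp P Q (dp.length : Int)
        (((dp.take k).map (F dp P Q)).foldl min (dp.sum * Q), F dp P Q (dp.getD (k-1) 0)) (k : Int)
        = (((dp.take (k+1)).map (F dp P Q)).foldl min (dp.sum * Q), F dp P Q (dp.getD k 0)) := by
      rw [htake, List.map_append, List.foldl_append]
      simp only [List.map_cons, List.map_nil, List.foldl_cons, List.foldl_nil]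
      simp only [stepA]
      rw [hget, hget', hgetD, hgetDk]
      by_cases hne : dp[k] = dp[k-1]
      · rw [if_neg (by simpa using hne), hne]
        have hle : ((dp.take k).map (F dp P Q)).foldl min (dp.sum * Q) ≤ F dp P Q dp[k-1] :=
          (PySem.List.foldl_min_le _ _).2 _ hmemk
        rw [min_eq_left hle]
      · rw [if_pos (by simpa using hne)]
        have hlt : dp[k-1] < dp[k] :=
          lt_of_le_of_ne (mono (k-1) k hk1lt hklt (by omega)) (fun h => hne h.symm)
        have hstep := F_step (dp.take k) (dp.drop k) P Q dp[k-1] dp[k] hlt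
          (by
            intro x hx
            obtain ⟨i, hi, rfl⟩ := List.mem_iff_getElem.mp hx
            have hi2 := hi
            simp only [List.length_take] at hi2
            have : (dp.take k)[i] = dp[i]'(by omega) := List.getElem_take
            rw [this]
            exact mono i (k-1) (by omega) hk1lt (by omega))
          (by
            intro x hx
            obtain ⟨i, hi, rfl⟩ := List.mem_iff_getElem.mp hx
            have hi2 := hi
            simp only [List.length_drop] at hi2
            have : (dp.drop k)[i] = dp[k+i]'(by omega) := List.getElem_drop
            rw [this]
            exact mono k (k+i) hklt (by omega) (by omega))
        rw [List.take_append_drop] at hstep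
        have hlen : ((dp.take k).length : Int) = (k : Int) := by
          simp [List.length_take]; omega
        have hlend : ((dp.drop k).length : Int) = (dp.length : Int) - (k : Int) := by
          simp [List.length_drop]; omega
        rw [hlen, hlend] at hstep
        have hcost' : F dp P Q dp[k-1]
            + (P * (k : Int) * (dp[k] - dp[k-1]) - Q * ((dp.length : Int) - (k : Int)) * (dp[k] - dp[k-1]))
            = F dp P Q dp[k] := by rw [hstep]
        rw [hcost', ite_gt_eq_min]
    rw [hnext]
    have : ((k : Int) + 1) = ((k + 1 : Nat) : Int) := by push_cast; ring
    rw [this]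
    exact ih (k+1) (by omega) (by omega)

-- ===== VERDICT (by name: the statement is the Claim_ definition above) =====
theorem solution_spec : Claim_equal_solution := by
  intro land P Q _ hpre
  unfold Spec_solution
  unfold Pre_solution at hpre
  simp only [solution, solution_alt]
  rw [PySem.List.foldl_append_eq_flatMap]
  simp only [List.nil_append]
  have hid : List.flatMap (id : List Int → List Int) land = List.flatMap (fun la => la) land := rfl
  rw [hid] at hpre ⊢
  obtain ⟨cells, hcells⟩ : ∃ c, List.flatMap (fun la : List Int => la) land = c := ⟨_, rfl⟩
  rw [hcells] at hpre ⊢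
  obtain ⟨dp, hdp⟩ : ∃ d, PySem.List.sorted cells (fun x => x) false = d := ⟨_, rfl⟩
  rw [hdp]
  have hperm : dp.Perm cells := hdp ▸ PySem.List.sorted_perm cells (fun x => x) false
  have hpw : dp.Pairwise (· ≤ ·) := hdp ▸ PySem.List.sorted_pairwise cells (fun x => x)
  have hne : dp ≠ [] := by
    rw [← hdp, Ne, PySem.List.sorted_eq_nil_iff]; exact hpre
  have h0 : 0 < dp.length := List.length_pos_iff.mpr hne
  have hget0 : PySem.List.pyGetD dp 0 0 = dp[0] := by
    rw [PySem.List.pyGetD_zero, List.getD_eq_getElem dp 0 h0]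
  have hmin0 : ∀ x ∈ dp, dp[0] ≤ x := by
    intro x hx
    obtain ⟨i, hi, rfl⟩ := List.mem_iff_getElem.mp hx
    rcases Nat.eq_zero_or_pos i with rfl | hip
    · exact le_refl _
    · exact List.pairwise_iff_getElem.mp hpw 0 i h0 hi hip
  have hsum : cells.sum = dp.sum := (hperm.sum_eq).symm
  have hcost0 : (dp.sum - PySem.List.pyGetD dp 0 0 * (dp.length : Int)) * Q = F dp P Q dp[0] := by
    rw [hget0, F_min dp P Q dp[0] hmin0]
  have htake1 : dp.take 1 = [dp[0]] := by
    cases dp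
    · exact absurd rfl hne
    · simp
  rw [hsum]
  -- A's side: initial answer/cost, then the sweep
  have hinit : (if dp.sum * Q > (dp.sum - PySem.List.pyGetD dp 0 0 * (dp.length : Int)) * Q
       then (dp.sum - PySem.List.pyGetD dp 0 0 * (dp.length : Int)) * Q
       else dp.sum * Q) = ((dp.take 1).map (F dp P Q)).foldl min (dp.sum * Q) := by
    rw [hcost0, ite_gt_eq_min, htake1]
    simp
  have hc0 : (dp.sum - PySem.List.pyGetD dp 0 0 * (dp.length : Int)) * Q
      = F dp P Q (dp.getD (1-1) 0) := by
    rw [hcost0]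
    congr 1
    exact (List.getD_eq_getElem dp 0 h0).symm
  rw [hinit, hc0]
  have hsweep := sweep dp P Q hpw (dp.length - 1) 1 (le_refl 1) (by omega)
  rw [Nat.cast_one] at hsweep
  rw [hsweep]
  -- B's side
  have hB : (PySem.Set.ofList cells).foldl
        (fun best h => if cellCost cells P Q h < best then cellCost cells P Q h else best)
        (dp.sum * Q)
      = ((PySem.Set.ofList cells).map (F dp P Q)).foldl min (dp.sum * Q) := by
    have hfun : (fun (best h : Int) => if cellCost cells P Q h < best then cellCost cells P Q h else best)
        = fun (best h : Int) => min best (F dp P Q h) := by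
      funext b h
      rw [ite_lt_eq_min, cellCost_eq_F, F_perm hperm.symm P Q]
    rw [hfun, ← List.foldl_map]
  rw [hB]
  exact (foldl_min_eq_of_mem_iff (dp.sum * Q) _ _ (by
    intro x
    simp only [List.mem_map]
    constructor
    · rintro ⟨y, hy, rfl⟩
      exact ⟨y, hperm.mem_iff.mpr ((PySem.Set.mem_ofList _ _).mp hy), rfl⟩
    · rintro ⟨y, hy, rfl⟩
      exact ⟨y, (PySem.Set.mem_ofList _ _).mpr (hperm.mem_iff.mp hy), rfl⟩)).symm
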